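-- pv_equiv track=rewrite | github.com/MedTAG/medtag-core | MedTAG_Dockerized/MedTAG_sket_dock/MedTAG_sket_dock_App/sket/sket/nerd/nerd.py | associate_cervix_in_situ_invasive_concepts
-- ===== SOURCE A (Python) =====
-- def associate_cervix_in_situ_invasive_concepts(mentions_and_concepts):
-- 	"""
-- 	Associate in situ/invasive cervical adenocarcinoma to the corresponding concepts
--
-- 	Params:
-- 		mentions_and_concepts (list(list(str))): list of mentions and concepts extracted from report
--
-- 	Returns: mentions and concepts after in situ/invasive association
-- 	"""
--
-- 	# set invasive flag
-- 	invasive = any([m_and_c for m_and_c in mentions_and_concepts if 'invasive' in m_and_c[0]])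
-- 	# remove 'invasive' or 'invasive growth' from mentions_and_concepts
-- 	ixs = [
-- 		ix for ix, m_and_c in enumerate(mentions_and_concepts)
-- 		if 'invasive' == m_and_c[0] or 'invasive growth' == m_and_c[0] or 'growth invasive' == m_and_c[0]]
-- 	new_mentions_and_concepts = []
-- 	for ix, m_and_c in enumerate(mentions_and_concepts):
-- 		if ix in ixs:  # skip m_and_c because it refers to invasive mentions
-- 			continue
-- 		new_mentions_and_concepts.append(m_and_c)
--
-- 	# set squamous cell carcinoma/adenocarcinoma in situ and invasive concepts
-- 	sqcc = ['squamous carcinoma in situ', 'cervical squamous cell carcinoma']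
-- 	adeno = ['cervical adenocarcinoma in situ', 'cervical adenocarcinoma']
--
-- 	# get squamous cell carcinoma/adenocarcinoma mentions and concepts
-- 	sqcc_mcs = [(ix, m_and_c) for ix, m_and_c in enumerate(new_mentions_and_concepts) if m_and_c[1] in sqcc]
-- 	adeno_mcs = [(ix, m_and_c) for ix, m_and_c in enumerate(new_mentions_and_concepts) if m_and_c[1] in adeno]
--
-- 	# replace wrong in situ/invasive concepts when found
-- 	if invasive:  # invasive squamous cell carcinoma or adenocarcinoma
-- 		for (ix, m_and_c) in sqcc_mcs:  # loop over squamous cell carcinoma mentions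
-- 			if m_and_c[1] == sqcc[0]:  # sqcc in situ found
-- 				if 'in situ' in m_and_c[0]:  # keep in situ as contained within mention
-- 					continue
-- 				else:  # replace sqcc in situ with sqcc invasive
-- 					new_mentions_and_concepts[ix] = [m_and_c[0], sqcc[1]]
-- 		for (ix, m_and_c) in adeno_mcs:  # loop over cervical adenocarcinoma mentions
-- 			if m_and_c[1] == adeno[0]:  # adeno in situ found
-- 				if 'in situ' in m_and_c[0]:  # keep in situ as contained within mention
-- 					continue
-- 				else:  # replace adeno in situ with adeno invasive
-- 					new_mentions_and_concepts[ix] = [m_and_c[0], adeno[1]]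
-- 	else:  # in situ squamous cell carcinoma or adenocarcinoma
-- 		for (ix, m_and_c) in sqcc_mcs:  # loop over squamous cell carcinoma mentions
-- 			if m_and_c[1] == sqcc[1]:  # sqcc invasive found
-- 				# replace sqcc invasive with sqcc in situ
-- 				new_mentions_and_concepts[ix] = [m_and_c[0], sqcc[0]]
-- 		for (ix, m_and_c) in adeno_mcs:  # loop over cervical adenocarcinoma mentions
-- 			if m_and_c[1] == adeno[1]:  # adeno invasive found
-- 				# replace adeno invasive with adeno in situ
-- 				new_mentions_and_concepts[ix] = [m_and_c[0], adeno[0]]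
-- 	# return post processed mentions and concepts
-- 	return new_mentions_and_concepts
-- ===== SOURCE B (Python) =====
-- def associate_cervix_in_situ_invasive_concepts(mentions_and_concepts):
--     """In situ/invasive cervical carcinoma association: one pass, no index tables."""
--     sqcc_is, sqcc_inv = 'squamous carcinoma in situ', 'cervical squamous cell carcinoma'
--     adeno_is, adeno_inv = 'cervical adenocarcinoma in situ', 'cervical adenocarcinoma'
--     invasive = any('invasive' in row[0] for row in mentions_and_concepts)
--     out = []
--     for row in mentions_and_concepts:
--         if row[0] in ('invasive', 'invasive growth', 'growth invasive'):
--             continue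
--         mention, concept = row[0], row[1]
--         if invasive:
--             if concept == sqcc_is and 'in situ' not in mention:
--                 row = [mention, sqcc_inv]
--             elif concept == adeno_is and 'in situ' not in mention:
--                 row = [mention, adeno_inv]
--         else:
--             if concept == sqcc_inv:
--                 row = [mention, sqcc_is]
--             elif concept == adeno_inv:
--                 row = [mention, adeno_is]
--         out.append(row)
--     return out
-- ===== Notes on version B (the rewrite author's own statement) =====
-- stated objective: simpler
-- what changed: B replaces A's index tables (ixs, sqcc_mcs, adeno_mcs) and four index-mutating relabel loops by a single pass over the rows that drops the 'invasive' marker rows and relabels each kept row inline.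
import Mathlib
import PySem

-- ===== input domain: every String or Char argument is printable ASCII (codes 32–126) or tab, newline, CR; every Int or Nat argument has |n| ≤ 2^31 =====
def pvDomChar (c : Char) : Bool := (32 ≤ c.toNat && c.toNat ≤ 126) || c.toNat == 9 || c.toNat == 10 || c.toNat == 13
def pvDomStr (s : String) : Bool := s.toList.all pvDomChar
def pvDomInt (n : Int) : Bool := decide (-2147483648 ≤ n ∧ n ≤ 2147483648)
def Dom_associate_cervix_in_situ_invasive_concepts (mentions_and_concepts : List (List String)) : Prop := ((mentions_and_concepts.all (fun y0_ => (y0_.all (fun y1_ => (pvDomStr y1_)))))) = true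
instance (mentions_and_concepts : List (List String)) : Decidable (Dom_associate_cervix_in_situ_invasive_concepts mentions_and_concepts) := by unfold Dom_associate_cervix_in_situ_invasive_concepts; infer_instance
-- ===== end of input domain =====

-- B replaces A's index tables and four index-mutating relabel loops by one pass that drops
-- 'invasive' marker rows and relabels each kept row inline (objective: simpler).


-- ===== PORT A =====
def associate_cervix_in_situ_invasive_concepts (mentions_and_concepts : List (List String)) : List (List String) :=
  -- invasive = any([m_and_c for m_and_c in mentions_and_concepts if 'invasive' in m_and_c[0]])
  -- (Python truthiness of each kept list = nonemptiness)
  let invasive : Bool :=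
    (mentions_and_concepts.filter
      (fun m_and_c => PySem.Str.isIn "invasive" (PySem.List.pyGetD m_and_c 0 ""))).any
      (fun m_and_c => !m_and_c.isEmpty)
  let ixs : List Int :=
    (PySem.List.enumerate mentions_and_concepts 0).filterMap
      (fun p =>
        if PySem.List.pyGetD p.2 0 "" == "invasive" || PySem.List.pyGetD p.2 0 "" == "invasive growth" ||
           PySem.List.pyGetD p.2 0 "" == "growth invasive" then some p.1 else none)
  let new_mcs : List (List String) :=
    (PySem.List.enumerate mentions_and_concepts 0).foldl
      (fun acc p => if ixs.contains p.1 then acc else acc ++ [p.2]) []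
  let sqcc : List String := ["squamous carcinoma in situ", "cervical squamous cell carcinoma"]
  let adeno : List String := ["cervical adenocarcinoma in situ", "cervical adenocarcinoma"]
  let sqcc_mcs := (PySem.List.enumerate new_mcs 0).filter (fun p => sqcc.contains (PySem.List.pyGetD p.2 1 ""))
  let adeno_mcs := (PySem.List.enumerate new_mcs 0).filter (fun p => adeno.contains (PySem.List.pyGetD p.2 1 ""))
  if invasive then
    let r1 := sqcc_mcs.foldl
      (fun cur p =>
        if PySem.List.pyGetD p.2 1 "" == sqcc.getD 0 "" then
          if PySem.Str.isIn "in situ" (PySem.List.pyGetD p.2 0 "") then cur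
          else cur.set p.1.toNat [PySem.List.pyGetD p.2 0 "", sqcc.getD 1 ""]  -- enumerate index is ≥ 0
        else cur) new_mcs
    adeno_mcs.foldl
      (fun cur p =>
        if PySem.List.pyGetD p.2 1 "" == adeno.getD 0 "" then
          if PySem.Str.isIn "in situ" (PySem.List.pyGetD p.2 0 "") then cur
          else cur.set p.1.toNat [PySem.List.pyGetD p.2 0 "", adeno.getD 1 ""]
        else cur) r1
  else
    let r1 := sqcc_mcs.foldl
      (fun cur p =>
        if PySem.List.pyGetD p.2 1 "" == sqcc.getD 1 "" then
          cur.set p.1.toNat [PySem.List.pyGetD p.2 0 "", sqcc.getD 0 ""]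
        else cur) new_mcs
    adeno_mcs.foldl
      (fun cur p =>
        if PySem.List.pyGetD p.2 1 "" == adeno.getD 1 "" then
          cur.set p.1.toNat [PySem.List.pyGetD p.2 0 "", adeno.getD 0 ""]
        else cur) r1

-- ===== PORT B =====
def associate_cervix_in_situ_invasive_concepts_alt (mentions_and_concepts : List (List String)) : List (List String) :=
  let sqcc_is := "squamous carcinoma in situ"
  let sqcc_inv := "cervical squamous cell carcinoma"
  let adeno_is := "cervical adenocarcinoma in situ"
  let adeno_inv := "cervical adenocarcinoma"
  let invasive := mentions_and_concepts.any (fun row => PySem.Str.isIn "invasive" (PySem.List.pyGetD row 0 ""))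
  mentions_and_concepts.foldl
    (fun out row =>
      if PySem.List.pyGetD row 0 "" == "invasive" || PySem.List.pyGetD row 0 "" == "invasive growth" ||
         PySem.List.pyGetD row 0 "" == "growth invasive" then out
      else
        let mention := PySem.List.pyGetD row 0 ""
        let concept := PySem.List.pyGetD row 1 ""
        let row' :=
          if invasive then
            if concept == sqcc_is && !PySem.Str.isIn "in situ" mention then [mention, sqcc_inv]
            else if concept == adeno_is && !PySem.Str.isIn "in situ" mention then [mention, adeno_inv]
            else row
          else
            if concept == sqcc_inv then [mention, sqcc_is]
            else if concept == adeno_inv then [mention, adeno_is]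
            else row
        out ++ [row']) []

-- ===== PRECONDITION & SPEC =====
-- Pre_ excludes exactly the inputs on which the Python A raises IndexError: a row must be
-- nonempty (A reads row[0] on every row) and a row that is not one of the removed 'invasive'
-- marker rows must have at least 2 elements (A reads row[1] on every kept row).
def Pre_associate_cervix_in_situ_invasive_concepts (mentions_and_concepts : List (List String)) : Prop :=
  ∀ row ∈ mentions_and_concepts, 1 ≤ row.length ∧
    (2 ≤ row.length ∨ row.headD "" = "invasive" ∨ row.headD "" = "invasive growth" ∨ row.headD "" = "growth invasive")
instance (mentions_and_concepts : List (List String)) : Decidable (Pre_associate_cervix_in_situ_invasive_concepts mentions_and_concepts) := by unfold Pre_associate_cervix_in_situ_invasive_concepts; infer_instance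

def pvWitness_associate_cervix_in_situ_invasive_concepts : List (List String) :=
  [["invasive carcinoma", "squamous carcinoma in situ"], ["invasive"], ["lesion", "cervical adenocarcinoma"]]

def Spec_associate_cervix_in_situ_invasive_concepts (mentions_and_concepts : List (List String)) (out : List (List String)) : Prop := out = associate_cervix_in_situ_invasive_concepts_alt mentions_and_concepts
instance (mentions_and_concepts : List (List String)) (out : List (List String)) : Decidable (Spec_associate_cervix_in_situ_invasive_concepts mentions_and_concepts out) := by unfold Spec_associate_cervix_in_situ_invasive_concepts; infer_instance

-- ===== CLAIM (what is proved, stated in full; the proofs are below) =====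
def Claim_equal_associate_cervix_in_situ_invasive_concepts : Prop := ∀ (mentions_and_concepts : List (List String)), Dom_associate_cervix_in_situ_invasive_concepts mentions_and_concepts → Pre_associate_cervix_in_situ_invasive_concepts mentions_and_concepts → Spec_associate_cervix_in_situ_invasive_concepts mentions_and_concepts (associate_cervix_in_situ_invasive_concepts mentions_and_concepts)

-- ===== LEMMAS AND PROOFS =====

-- predicates/relabel function shared by the equivalence argument
def pvInv (r : List String) : Bool := PySem.Str.isIn "invasive" (PySem.List.pyGetD r 0 "")

def pvRemoved (r : List String) : Bool :=
  PySem.List.pyGetD r 0 "" == "invasive" || PySem.List.pyGetD r 0 "" == "invasive growth" ||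
  PySem.List.pyGetD r 0 "" == "growth invasive"

def pvRelabel (inv : Bool) (r : List String) : List String :=
  let m := PySem.List.pyGetD r 0 ""
  let c := PySem.List.pyGetD r 1 ""
  if inv then
    if c == "squamous carcinoma in situ" && !PySem.Str.isIn "in situ" m then
      [m, "cervical squamous cell carcinoma"]
    else if c == "cervical adenocarcinoma in situ" && !PySem.Str.isIn "in situ" m then
      [m, "cervical adenocarcinoma"]
    else r
  else
    if c == "cervical squamous cell carcinoma" then [m, "squamous carcinoma in situ"]
    else if c == "cervical adenocarcinoma" then [m, "cervical adenocarcinoma in situ"]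
    else r

-- A's truthiness-based invasive flag equals B's direct any
lemma pv_inv_eq (l : List (List String)) :
    (l.filter pvInv).any (fun r => !r.isEmpty) = l.any pvInv := by
  rw [List.any_filter]
  congr 1
  funext r
  cases r with
  | nil => decide
  | cons a s => simp

-- snd-projection of a filtered enumeration (condition on the element only)
lemma pv_enum_filter_map_snd {α : Type} (g : α → Bool) :
    ∀ (xs : List α) (s : Int),
      ((PySem.List.enumerate xs s).filter (fun p => g p.2)).map Prod.snd = xs.filter g := by
  intro xs
  induction xs with
  | nil => intro s; rfl
  | cons x t ih =>
      intro s
      by_cases h : g x <;>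
        simp [PySem.List.enumerate_cons, h, ih (s + 1)]

-- indices of a filtered enumeration are distinct and in range
lemma pv_enum_filter_nodup {α : Type} (q : Int × α → Bool) (xs : List α) :
    ((((PySem.List.enumerate xs 0).filter q).map Prod.fst)).Nodup := by
  have hp : ((PySem.List.enumerate xs 0).filter q).Pairwise (fun p q => p.1 < q.1) :=
    (PySem.List.pairwise_lt_enumerate xs 0).filter _
  have : (((PySem.List.enumerate xs 0).filter q).map Prod.fst).Pairwise (· < ·) :=
    List.pairwise_map.mpr hp
  exact this.imp (fun h => ne_of_lt h)

lemma pv_enum_filter_mem {α : Type} (q : Int × α → Bool) (xs : List α) :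
    ∀ p ∈ (PySem.List.enumerate xs 0).filter q,
      ∃ (k : Nat) (h : k < xs.length), p = ((k : Int), xs[k]) ∧ q p = true := by
  intro p hp
  rcases List.mem_filter.mp hp with ⟨hmem, hq⟩
  rcases (PySem.List.mem_enumerate_iff xs 0 p).mp hmem with ⟨k, hk, hpk⟩
  exact ⟨k, hk, by simpa using hpk, hq⟩

-- find? by index in a filtered enumeration
lemma pv_enum_filter_find {α : Type} (q : Int × α → Bool) (xs : List α) (j : Nat)
    (hj : j < xs.length) :
    (((PySem.List.enumerate xs 0).filter q).find? (fun p => p.1 == (j : Int))) =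
      (if q ((j : Int), xs[j]) then some ((j : Int), xs[j]) else none) := by
  by_cases hq : q ((j : Int), xs[j])
  · have hmem : ((j : Int), xs[j]) ∈ (PySem.List.enumerate xs 0).filter q := by
      refine List.mem_filter.mpr ⟨?_, hq⟩
      exact (PySem.List.mem_enumerate_iff xs 0 _).mpr ⟨j, hj, by simp⟩
    have hsome : (((PySem.List.enumerate xs 0).filter q).find?
        (fun p => p.1 == (j : Int))).isSome := by
      rw [List.find?_isSome]
      exact ⟨_, hmem, by simp⟩
    rcases Option.isSome_iff_exists.mp hsome with ⟨p, hfind⟩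
    have hpm : p ∈ (PySem.List.enumerate xs 0).filter q := List.mem_of_find?_eq_some hfind
    have hpj : p.1 = (j : Int) := by
      have := List.find?_some hfind
      simpa using this
    rcases pv_enum_filter_mem q xs p hpm with ⟨k, hk, hpk, _⟩
    have hkj : k = j := by
      have : (k : Int) = (j : Int) := by rw [hpk] at hpj; simpa using hpj
      exact_mod_cast this
    subst hkj
    simp [hq, hfind, hpk]
  · rw [List.find?_eq_none.mpr, if_neg hq]
    intro p hp
    rcases pv_enum_filter_mem q xs p hp with ⟨k, hk, hpk, hqp⟩
    intro hbeq
    have hpj : p.1 = (j : Int) := by simpa using hbeq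
    have hkj : k = j := by
      have : (k : Int) = (j : Int) := by rw [hpk] at hpj; simpa using hpj
      exact_mod_cast this
    subst hkj
    rw [hpk] at hqp
    exact hq hqp

-- a fold of conditional sets leaves untouched indices alone
lemma pv_foldl_set_untouched {α : Type} (c : Int × α → Bool) (v : Int × α → α) :
    ∀ (pairs : List (Int × α)) (ys : List α) (j : Nat),
      (∀ p ∈ pairs, 0 ≤ p.1) → (∀ p ∈ pairs, p.1 ≠ (j : Int)) →
      (pairs.foldl (fun cur p => if c p then cur.set p.1.toNat (v p) else cur) ys)[j]? = ys[j]? := by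
  intro pairs
  induction pairs with
  | nil => intro ys j _ _; rfl
  | cons p ps ih =>
      intro ys j h0 hne
      simp only [List.foldl_cons]
      rw [ih _ j (fun q hq => h0 q (List.mem_cons_of_mem _ hq))
            (fun q hq => hne q (List.mem_cons_of_mem _ hq))]
      by_cases hc : c p
      · rw [if_pos hc]
        have hp0 : 0 ≤ p.1 := h0 p List.mem_cons_self
        have hpj : p.1.toNat ≠ j := by
          intro h
          exact hne p List.mem_cons_self (by omega)
        rw [List.getElem?_set_ne hpj]
      · rw [if_neg hc]

lemma pv_foldl_set_length {α : Type} (c : Int × α → Bool) (v : Int × α → α) :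
    ∀ (pairs : List (Int × α)) (ys : List α),
      (pairs.foldl (fun cur p => if c p then cur.set p.1.toNat (v p) else cur) ys).length
        = ys.length := by
  intro pairs
  induction pairs with
  | nil => intro ys; rfl
  | cons p ps ih =>
      intro ys
      simp only [List.foldl_cons]
      rw [ih]
      by_cases hc : c p <;> simp [hc]

-- characterization of a fold of conditional sets at distinct nonnegative indices
lemma pv_foldl_set_getElem {α : Type} (c : Int × α → Bool) (v : Int × α → α) :
    ∀ (pairs : List (Int × α)) (ys : List α) (j : Nat),
      (pairs.map Prod.fst).Nodup → (∀ p ∈ pairs, 0 ≤ p.1) → j < ys.length →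
      (pairs.foldl (fun cur p => if c p then cur.set p.1.toNat (v p) else cur) ys)[j]? =
        (match pairs.find? (fun p => p.1 == (j : Int)) with
         | some p => if c p then some (v p) else ys[j]?
         | none => ys[j]?) := by
  intro pairs
  induction pairs with
  | nil => intro ys j _ _ _; rfl
  | cons p ps ih =>
      intro ys j hnd h0 hj
      have h0' : ∀ q ∈ ps, 0 ≤ q.1 := fun q hq => h0 q (List.mem_cons_of_mem _ hq)
      have hnd2 := List.nodup_cons.mp (by simpa using hnd :
        (p.1 :: ps.map Prod.fst).Nodup)
      have hnd' : (ps.map Prod.fst).Nodup := hnd2.2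
      have hpnot : p.1 ∉ ps.map Prod.fst := hnd2.1
      simp only [List.foldl_cons]
      by_cases hpj : p.1 = (j : Int)
      · have htail : ∀ q ∈ ps, q.1 ≠ (j : Int) := by
          intro q hq hqj
          exact hpnot (List.mem_map.mpr ⟨q, hq, by rw [hqj, hpj]⟩)
        rw [List.find?_cons_of_pos (by simpa using hpj)]
        by_cases hc : c p
        · simp only [if_pos hc]
          rw [pv_foldl_set_untouched c v ps _ j h0' htail]
          have ht : p.1.toNat = j := by omega
          rw [ht, List.getElem?_set_self (by omega)]
        · simp only [if_neg hc]
          rw [pv_foldl_set_untouched c v ps _ j h0' htail]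
      · rw [List.find?_cons_of_neg (by simpa using hpj)]
        by_cases hc : c p
        · simp only [if_pos hc]
          rw [ih _ j hnd' h0' (by simpa using hj)]
          have hne : p.1.toNat ≠ j := by
            have := h0 p List.mem_cons_self
            omega
          rw [List.getElem?_set_ne hne]
        · simp only [if_neg hc]
          exact ih _ j hnd' h0' hj

-- one relabel pass of A, read off pointwise
lemma pv_pass_getElem (q c : Int × List String → Bool) (v : Int × List String → List String)
    (xs ys : List (List String)) (hlen : ys.length = xs.length) (j : Nat) (hj : j < xs.length) :
    (((PySem.List.enumerate xs 0).filter q).foldl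
        (fun cur p => if c p then cur.set p.1.toNat (v p) else cur) ys)[j]? =
      (if q ((j : Int), xs[j]) && c ((j : Int), xs[j]) then some (v ((j : Int), xs[j]))
       else ys[j]?) := by
  rw [pv_foldl_set_getElem c v _ ys j (pv_enum_filter_nodup q xs)
        (fun p hp => by rcases pv_enum_filter_mem q xs p hp with ⟨k, hk, hpk, _⟩; simp [hpk])
        (by omega),
      pv_enum_filter_find q xs j hj]
  by_cases hq : q ((j : Int), xs[j]) <;> simp [hq]


-- one relabel pass (abstracted shapes of A's four loops)
def pvPass (q c : Int × List String → Bool) (v : Int × List String → List String)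
    (xs ys : List (List String)) : List (List String) :=
  ((PySem.List.enumerate xs 0).filter q).foldl
    (fun cur p => if c p then cur.set p.1.toNat (v p) else cur) ys

def pvPassN (q c s : Int × List String → Bool) (v : Int × List String → List String)
    (xs ys : List (List String)) : List (List String) :=
  ((PySem.List.enumerate xs 0).filter q).foldl
    (fun cur p => if c p then (if s p then cur else cur.set p.1.toNat (v p)) else cur) ys

lemma pvPassN_eq_pass (q c s : Int × List String → Bool) (v : Int × List String → List String)
    (xs ys : List (List String)) :
    pvPassN q c s v xs ys = pvPass q (fun p => c p && !s p) v xs ys := by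
  unfold pvPassN pvPass
  congr 1
  funext cur p
  by_cases hc : c p
  · by_cases hs : s p <;> simp [hc, hs]
  · simp [hc]

lemma pvPass_length (q c : Int × List String → Bool) (v : Int × List String → List String)
    (xs ys : List (List String)) : (pvPass q c v xs ys).length = ys.length :=
  pv_foldl_set_length c v _ ys

lemma pvPass_getElem (q c : Int × List String → Bool) (v : Int × List String → List String)
    (xs ys : List (List String)) (hlen : ys.length = xs.length) (j : Nat) (hj : j < xs.length) :
    (pvPass q c v xs ys)[j]? =
      (if q ((j : Int), xs[j]) && c ((j : Int), xs[j]) then some (v ((j : Int), xs[j]))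
       else ys[j]?) :=
  pv_pass_getElem q c v xs ys hlen j hj

-- A's construction of new_mentions_and_concepts is a filter
def pvNew (l : List (List String)) : List (List String) :=
  (PySem.List.enumerate l 0).foldl
    (fun acc p => if ((PySem.List.enumerate l 0).filterMap
        (fun q => if pvRemoved q.2 then some q.1 else none)).contains p.1 then acc
      else acc ++ [p.2]) []

lemma pv_new_eq (l : List (List String)) :
    pvNew l = l.filter (fun r => !pvRemoved r) := by
  unfold pvNew
  have hfun : (fun (acc : List (List String)) (p : Int × List String) =>
        if ((PySem.List.enumerate l 0).filterMap
            (fun q => if pvRemoved q.2 then some q.1 else none)).contains p.1 then acc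
        else acc ++ [p.2]) =
      (fun acc p => if !((PySem.List.enumerate l 0).filterMap
            (fun q => if pvRemoved q.2 then some q.1 else none)).contains p.1 then acc ++ [p.2]
        else acc) := by
    funext acc p
    cases h : ((PySem.List.enumerate l 0).filterMap
        (fun q => if pvRemoved q.2 then some q.1 else none)).contains p.1 <;> simp
  rw [hfun, PySem.List.foldl_append_if, List.nil_append]
  rw [List.filter_congr (fun p hp => ?_)]
  · exact pv_enum_filter_map_snd (fun r => !pvRemoved r) l 0
  · -- membership in ixs ↔ the row is a removed marker row
    rcases (PySem.List.mem_enumerate_iff l 0 p).mp hp with ⟨k, hk, hpk⟩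
    have hiff : p.1 ∈ ((PySem.List.enumerate l 0).filterMap
        (fun q => if pvRemoved q.2 then some q.1 else none)) ↔ pvRemoved p.2 = true := by
      constructor
      · intro h
        rcases List.mem_filterMap.mp h with ⟨q, hq, hval⟩
        by_cases hr : pvRemoved q.2
        · rcases (PySem.List.mem_enumerate_iff l 0 q).mp hq with ⟨k', hk', hqk⟩
          have hq1 : q.1 = p.1 := by simpa [hr] using hval
          have hkk : k' = k := by
            have : ((k' : Int)) = (k : Int) := by
              have h1 : q.1 = (k' : Int) := by simp [hqk]
              have h2 : p.1 = (k : Int) := by simp [hpk]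
              rw [← h1, ← h2, hq1]
            exact_mod_cast this
          subst hkk
          have : q = p := hqk.trans hpk.symm
          rw [← this]; exact hr
        · simp [hr] at hval
      · intro h
        exact List.mem_filterMap.mpr ⟨p, hp, by simp [h]⟩
    have hcont : ((PySem.List.enumerate l 0).filterMap
        (fun q => if pvRemoved q.2 then some q.1 else none)).contains p.1 = pvRemoved p.2 := by
      cases hP : pvRemoved p.2
      · refine Bool.eq_false_iff.mpr ?_
        intro hm
        have := hiff.mp (List.contains_iff_mem.mp hm)
        simp [hP] at this
      · exact List.contains_iff_mem.mpr (hiff.mpr (by simp [hP]))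
    rw [hcont]

-- two sequential relabel passes, pointwise
lemma pv_two_pass_map (q1 c1 : List String → Bool) (v1 : List String → List String)
    (q2 c2 : List String → Bool) (v2 : List String → List String)
    (f : List String → List String) (xs : List (List String))
    (hrow : ∀ r : List String,
      (if q2 r && c2 r then some (v2 r)
       else if q1 r && c1 r then some (v1 r) else some r) = some (f r)) :
    pvPass (fun p => q2 p.2) (fun p => c2 p.2) (fun p => v2 p.2) xs
      (pvPass (fun p => q1 p.2) (fun p => c1 p.2) (fun p => v1 p.2) xs xs) = xs.map f := by
  have hlen1 : (pvPass (fun p => q1 p.2) (fun p => c1 p.2) (fun p => v1 p.2) xs xs).length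
      = xs.length := pvPass_length _ _ _ xs xs
  apply List.ext_getElem?
  intro j
  by_cases hj : j < xs.length
  · rw [pvPass_getElem _ _ _ xs _ hlen1 j hj, pvPass_getElem _ _ _ xs _ rfl j hj,
        List.getElem?_map, List.getElem?_eq_getElem hj]
    simpa using hrow xs[j]
  · have h1 : xs.length ≤ j := by omega
    rw [List.getElem?_eq_none (by rw [pvPass_length, hlen1]; omega),
        List.getElem?_eq_none (by simp; omega)]

-- the two sequential relabel loops act pointwise as pvRelabel (invasive case)
lemma pv_branch_true (xs : List (List String)) :
    pvPassN (fun p => (["cervical adenocarcinoma in situ", "cervical adenocarcinoma"] : List String).contains (PySem.List.pyGetD p.2 1 ""))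
        (fun p => PySem.List.pyGetD p.2 1 "" == "cervical adenocarcinoma in situ")
        (fun p => PySem.Str.isIn "in situ" (PySem.List.pyGetD p.2 0 ""))
        (fun p => [PySem.List.pyGetD p.2 0 "", "cervical adenocarcinoma"]) xs
      (pvPassN (fun p => (["squamous carcinoma in situ", "cervical squamous cell carcinoma"] : List String).contains (PySem.List.pyGetD p.2 1 ""))
        (fun p => PySem.List.pyGetD p.2 1 "" == "squamous carcinoma in situ")
        (fun p => PySem.Str.isIn "in situ" (PySem.List.pyGetD p.2 0 ""))
        (fun p => [PySem.List.pyGetD p.2 0 "", "cervical squamous cell carcinoma"]) xs xs)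
    = xs.map (pvRelabel true) := by
  rw [pvPassN_eq_pass, pvPassN_eq_pass]
  refine pv_two_pass_map
    (fun r => (["squamous carcinoma in situ", "cervical squamous cell carcinoma"] : List String).contains (PySem.List.pyGetD r 1 ""))
    (fun r => PySem.List.pyGetD r 1 "" == "squamous carcinoma in situ" && !PySem.Str.isIn "in situ" (PySem.List.pyGetD r 0 ""))
    (fun r => [PySem.List.pyGetD r 0 "", "cervical squamous cell carcinoma"])
    (fun r => (["cervical adenocarcinoma in situ", "cervical adenocarcinoma"] : List String).contains (PySem.List.pyGetD r 1 ""))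
    (fun r => PySem.List.pyGetD r 1 "" == "cervical adenocarcinoma in situ" && !PySem.Str.isIn "in situ" (PySem.List.pyGetD r 0 ""))
    (fun r => [PySem.List.pyGetD r 0 "", "cervical adenocarcinoma"])
    (pvRelabel true) xs (fun r => ?_)
  by_cases h1 : PySem.List.pyGetD r 1 "" = "squamous carcinoma in situ"
  · simp [pvRelabel, h1]
    split <;> rfl
  · by_cases h2 : PySem.List.pyGetD r 1 "" = "cervical adenocarcinoma in situ"
    · simp [pvRelabel, h2]
      split <;> rfl
    · simp [pvRelabel, h1, h2]

-- the two sequential relabel loops act pointwise as pvRelabel (non-invasive case)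
lemma pv_branch_false (xs : List (List String)) :
    pvPass (fun p => (["cervical adenocarcinoma in situ", "cervical adenocarcinoma"] : List String).contains (PySem.List.pyGetD p.2 1 ""))
        (fun p => PySem.List.pyGetD p.2 1 "" == "cervical adenocarcinoma")
        (fun p => [PySem.List.pyGetD p.2 0 "", "cervical adenocarcinoma in situ"]) xs
      (pvPass (fun p => (["squamous carcinoma in situ", "cervical squamous cell carcinoma"] : List String).contains (PySem.List.pyGetD p.2 1 ""))
        (fun p => PySem.List.pyGetD p.2 1 "" == "cervical squamous cell carcinoma")
        (fun p => [PySem.List.pyGetD p.2 0 "", "squamous carcinoma in situ"]) xs xs)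
    = xs.map (pvRelabel false) := by
  refine pv_two_pass_map
    (fun r => (["squamous carcinoma in situ", "cervical squamous cell carcinoma"] : List String).contains (PySem.List.pyGetD r 1 ""))
    (fun r => PySem.List.pyGetD r 1 "" == "cervical squamous cell carcinoma")
    (fun r => [PySem.List.pyGetD r 0 "", "squamous carcinoma in situ"])
    (fun r => (["cervical adenocarcinoma in situ", "cervical adenocarcinoma"] : List String).contains (PySem.List.pyGetD r 1 ""))
    (fun r => PySem.List.pyGetD r 1 "" == "cervical adenocarcinoma")
    (fun r => [PySem.List.pyGetD r 0 "", "cervical adenocarcinoma in situ"])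
    (pvRelabel false) xs (fun r => ?_)
  by_cases h1 : PySem.List.pyGetD r 1 "" = "cervical squamous cell carcinoma"
  · simp [pvRelabel, h1]
  · by_cases h2 : PySem.List.pyGetD r 1 "" = "cervical adenocarcinoma"
    · simp [pvRelabel, h2]
    · simp [pvRelabel, h1, h2]

-- A computes filter-then-map
lemma pv_A_eq (l : List (List String)) :
    associate_cervix_in_situ_invasive_concepts l =
      (l.filter (fun r => !pvRemoved r)).map (pvRelabel (l.any pvInv)) := by
  show (if (l.filter pvInv).any (fun r => !r.isEmpty) = true then
      pvPassN (fun p => (["cervical adenocarcinoma in situ", "cervical adenocarcinoma"] : List String).contains (PySem.List.pyGetD p.2 1 ""))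
        (fun p => PySem.List.pyGetD p.2 1 "" == "cervical adenocarcinoma in situ")
        (fun p => PySem.Str.isIn "in situ" (PySem.List.pyGetD p.2 0 ""))
        (fun p => [PySem.List.pyGetD p.2 0 "", "cervical adenocarcinoma"]) (pvNew l)
        (pvPassN (fun p => (["squamous carcinoma in situ", "cervical squamous cell carcinoma"] : List String).contains (PySem.List.pyGetD p.2 1 ""))
          (fun p => PySem.List.pyGetD p.2 1 "" == "squamous carcinoma in situ")
          (fun p => PySem.Str.isIn "in situ" (PySem.List.pyGetD p.2 0 ""))
          (fun p => [PySem.List.pyGetD p.2 0 "", "cervical squamous cell carcinoma"]) (pvNew l) (pvNew l))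
    else
      pvPass (fun p => (["cervical adenocarcinoma in situ", "cervical adenocarcinoma"] : List String).contains (PySem.List.pyGetD p.2 1 ""))
        (fun p => PySem.List.pyGetD p.2 1 "" == "cervical adenocarcinoma")
        (fun p => [PySem.List.pyGetD p.2 0 "", "cervical adenocarcinoma in situ"]) (pvNew l)
        (pvPass (fun p => (["squamous carcinoma in situ", "cervical squamous cell carcinoma"] : List String).contains (PySem.List.pyGetD p.2 1 ""))
          (fun p => PySem.List.pyGetD p.2 1 "" == "cervical squamous cell carcinoma")
          (fun p => [PySem.List.pyGetD p.2 0 "", "squamous carcinoma in situ"]) (pvNew l) (pvNew l)))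
    = (l.filter (fun r => !pvRemoved r)).map (pvRelabel (l.any pvInv))
  rw [pv_inv_eq l]
  cases h : l.any pvInv
  · rw [if_neg (by simp), pv_branch_false, pv_new_eq]
  · rw [if_pos rfl, pv_branch_true, pv_new_eq]

-- B computes the same filter-then-map
lemma pv_B_eq (l : List (List String)) :
    associate_cervix_in_situ_invasive_concepts_alt l =
      (l.filter (fun r => !pvRemoved r)).map (pvRelabel (l.any pvInv)) := by
  show l.foldl (fun out row => if pvRemoved row then out
      else out ++ [pvRelabel (l.any pvInv) row]) [] = _
  have hfun : (fun (out : List (List String)) row => if pvRemoved row then out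
      else out ++ [pvRelabel (l.any pvInv) row]) =
      (fun out row => if !pvRemoved row then out ++ [pvRelabel (l.any pvInv) row] else out) := by
    funext out row
    cases h : pvRemoved row <;> simp
  rw [hfun, PySem.List.foldl_append_if, List.nil_append]

-- ===== VERDICT (by name: the statement is the Claim_ definition above) =====
theorem associate_cervix_in_situ_invasive_concepts_spec : Claim_equal_associate_cervix_in_situ_invasive_concepts := by
  intro l _ _
  unfold Spec_associate_cervix_in_situ_invasive_concepts
  rw [pv_A_eq, pv_B_eq]
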